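-- pv_equiv track=rewrite | github.com/UnveiledSafe8/ANDless | app/backend/logic_scripts/test.py | cubes2rpn
-- ===== SOURCE A (Python) =====
-- def cubes2rpn(cubes):
--     equation = []
--     total_cubes = 0
--     for cube in cubes:
--         productTerm = []
--         total_vars = 0
--         for index, input in enumerate(cube):
--             if input == -1:
--                 continue
--             productTerm.append("V" + str(index))
--             total_vars += 1
--             if input == 0:
--                 productTerm.append("NOT")
--             if total_vars > 1:
--                 productTerm.append("AND")
--         equation.extend(productTerm)
--         total_cubes += 1
--         if total_cubes > 1:
--             equation.append("OR")
--     return equation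
-- ===== SOURCE B (Python) =====
-- def postfix_join(groups, op):
--     if not groups:
--         return []
--     out = list(groups[0])
--     for g in groups[1:]:
--         out.extend(g)
--         out.append(op)
--     return out
--
--
-- def cube_term(cube):
--     groups = []
--     for i, v in enumerate(cube):
--         if v == -1:
--             continue
--         g = ["V" + str(i)]
--         if v == 0:
--             g.append("NOT")
--         groups.append(g)
--     return postfix_join(groups, "AND")
--
--
-- def cubes2rpn(cubes):
--     return postfix_join([cube_term(c) for c in cubes], "OR")
-- ===== Notes on version B (the rewrite author's own statement) =====
-- stated objective: simpler
-- what changed: Replaces the inline total_vars/total_cubes counters with a single postfix_join(groups, op) helper applied at both levels: each active variable becomes a literal token group joined with AND, and the per-cube terms are joined with OR.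
import Mathlib
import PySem

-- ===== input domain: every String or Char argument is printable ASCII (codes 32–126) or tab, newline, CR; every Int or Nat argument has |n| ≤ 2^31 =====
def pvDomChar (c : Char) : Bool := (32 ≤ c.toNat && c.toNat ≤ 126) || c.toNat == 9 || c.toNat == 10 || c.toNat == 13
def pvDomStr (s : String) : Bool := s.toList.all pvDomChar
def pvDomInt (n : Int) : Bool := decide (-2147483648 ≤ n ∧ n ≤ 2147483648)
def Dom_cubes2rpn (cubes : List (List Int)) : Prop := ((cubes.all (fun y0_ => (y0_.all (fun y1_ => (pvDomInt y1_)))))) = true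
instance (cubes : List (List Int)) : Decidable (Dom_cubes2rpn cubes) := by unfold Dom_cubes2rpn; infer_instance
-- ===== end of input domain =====

-- B replaces A's inline total_vars/total_cubes counters with one postfix_join helper used at both levels (simpler decomposition, same cost).

-- ===== PORT A =====
def cubes2rpn (cubes : List (List Int)) : List String :=
  (cubes.foldl (fun (st : List String × Int) cube =>
    let inner := (PySem.List.enumerate cube).foldl (fun (st2 : List String × Int) p =>
      if p.2 == -1 then st2
      else
        let productTerm := st2.1 ++ ["V" ++ PySem.Int.toStr p.1]
        let total_vars := st2.2 + 1
        let productTerm := if p.2 == 0 then productTerm ++ ["NOT"] else productTerm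
        let productTerm := if total_vars > 1 then productTerm ++ ["AND"] else productTerm
        (productTerm, total_vars)) ([], 0)
    let equation := st.1 ++ inner.1
    let total_cubes := st.2 + 1
    let equation := if total_cubes > 1 then equation ++ ["OR"] else equation
    (equation, total_cubes)) ([], 0)).1

-- ===== PORT B =====
def postfixJoin (groups : List (List String)) (op : String) : List String :=
  match groups with
  | [] => []
  | g :: rest => rest.foldl (fun out h => (out ++ h) ++ [op]) g

def cubeTerm (cube : List Int) : List String :=
  let groups := (PySem.List.enumerate cube).foldl (fun (gs : List (List String)) p =>
    if p.2 == -1 then gs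
    else gs ++ [["V" ++ PySem.Int.toStr p.1] ++ (if p.2 == 0 then ["NOT"] else [])]) []
  postfixJoin groups "AND"

def cubes2rpn_alt (cubes : List (List Int)) : List String :=
  postfixJoin (cubes.map cubeTerm) "OR"

-- ===== PRECONDITION & SPEC =====
def Spec_cubes2rpn (cubes : List (List Int)) (out : List String) : Prop := out = cubes2rpn_alt cubes
instance (cubes : List (List Int)) (out : List String) : Decidable (Spec_cubes2rpn cubes out) := by unfold Spec_cubes2rpn; infer_instance

-- ===== CLAIM (what is proved, stated in full; the proofs are below) =====
def Claim_equal_cubes2rpn : Prop := ∀ (cubes : List (List Int)), Dom_cubes2rpn cubes → Spec_cubes2rpn cubes (cubes2rpn cubes)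

-- ===== LEMMAS AND PROOFS =====

-- group of one active entry, as B builds it
def pvGroup (p : Int × Int) : List String :=
  ["V" ++ PySem.Int.toStr p.1] ++ (if p.2 == 0 then ["NOT"] else [])

-- generic fold characterization, positive counter: every group is followed by op
theorem fold_pos {α : Type} (f : α → List String) (op : String) :
    ∀ (xs : List α) (out : List String) (n : Int), 1 ≤ n →
    xs.foldl (fun (st : List String × Int) x =>
        ((st.1 ++ f x) ++ (if st.2 + 1 > 1 then [op] else []), st.2 + 1)) (out, n)
      = (out ++ xs.flatMap (fun x => f x ++ [op]), n + xs.length) := by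
  intro xs
  induction xs with
  | nil => intro out n _; simp
  | cons x xs ih =>
    intro out n hn
    have h1 : n + 1 > 1 := by omega
    simp only [List.foldl_cons, if_pos h1]
    rw [ih _ (n + 1) (by omega)]
    refine Prod.ext (by simp) (by simp; omega)

-- generic fold characterization from zero: postfixJoin
theorem fold_zero {α : Type} (f : α → List String) (op : String) (xs : List α) (out : List String) :
    xs.foldl (fun (st : List String × Int) x =>
        ((st.1 ++ f x) ++ (if st.2 + 1 > 1 then [op] else []), st.2 + 1)) (out, 0)
      = (out ++ postfixJoin (xs.map f) op, (xs.length : Int)) := by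
  cases xs with
  | nil => simp [postfixJoin]
  | cons x xs =>
    simp only [List.foldl_cons]
    have : ¬ ((0 : Int) + 1 > 1) := by omega
    rw [if_neg this]
    simp only [List.append_nil, zero_add]
    rw [fold_pos f op xs (out ++ f x) 1 (by omega)]
    simp only [postfixJoin, List.map_cons]
    have hj : ∀ (ys : List α) (acc : List String),
        (ys.map f).foldl (fun out h => (out ++ h) ++ [op]) acc
        = acc ++ ys.flatMap (fun y => f y ++ [op]) := by
      intro ys
      induction ys with
      | nil => intro acc; simp
      | cons y ys ihy => intro acc; rw [List.map_cons, List.foldl_cons, ihy]; simp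
    rw [hj]; simp; omega

-- skipping entries with the guard equals folding over the filtered list
theorem foldl_skip {a b : Type} (g : b -> a -> b) (pred : a -> Bool) :
    forall (xs : List a) (init : b),
    xs.foldl (fun st x => if pred x then st else g st x) init
    = (xs.filter (fun x => !pred x)).foldl g init := by
  intro xs
  induction xs with
  | nil => intro init; simp
  | cons x xs ih => intro init; by_cases h : pred x <;> simp [h, ih]

-- appending singletons is mapping
theorem foldl_append_singleton {a b : Type} (f : a -> b) :
    forall (xs : List a) (acc : List b),
    xs.foldl (fun gs x => gs ++ [f x]) acc = acc ++ xs.map f := by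
  intro xs
  induction xs with
  | nil => intro acc; simp
  | cons x xs ih => intro acc; simp [ih]

-- A's inner step written as guard + generic step
theorem innerA_step_eq :
    (fun (st2 : List String × Int) (p : Int × Int) =>
      if p.2 == -1 then st2
      else
        let productTerm := st2.1 ++ ["V" ++ PySem.Int.toStr p.1]
        let total_vars := st2.2 + 1
        let productTerm := if p.2 == 0 then productTerm ++ ["NOT"] else productTerm
        let productTerm := if total_vars > 1 then productTerm ++ ["AND"] else productTerm
        (productTerm, total_vars))
    = (fun (st2 : List String × Int) (p : Int × Int) =>
        if p.2 == -1 then st2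
        else ((st2.1 ++ pvGroup p) ++ (if st2.2 + 1 > 1 then ["AND"] else []), st2.2 + 1)) := by
  funext st2 p
  by_cases h : p.2 == -1
  · simp [h]
  · simp only [h, pvGroup]
    split_ifs <;> simp_all

-- A's inner fold over an enumerated cube equals B's cubeTerm
theorem inner_eq_cubeTerm (cube : List Int) :
    ((PySem.List.enumerate cube).foldl (fun (st2 : List String × Int) p =>
      if p.2 == -1 then st2
      else
        let productTerm := st2.1 ++ ["V" ++ PySem.Int.toStr p.1]
        let total_vars := st2.2 + 1
        let productTerm := if p.2 == 0 then productTerm ++ ["NOT"] else productTerm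
        let productTerm := if total_vars > 1 then productTerm ++ ["AND"] else productTerm
        (productTerm, total_vars)) (([] : List String), (0 : Int))).1
    = cubeTerm cube := by
  rw [innerA_step_eq]
  rw [foldl_skip (fun (st2 : List String × Int) (p : Int × Int) =>
        ((st2.1 ++ pvGroup p) ++ (if st2.2 + 1 > 1 then ["AND"] else []), st2.2 + 1))
      (fun p => p.2 == -1)]
  rw [fold_zero pvGroup "AND"]
  unfold cubeTerm
  rw [show (fun (gs : List (List String)) (p : Int × Int) =>
        if p.2 == -1 then gs
        else gs ++ [["V" ++ PySem.Int.toStr p.1] ++ (if p.2 == 0 then ["NOT"] else [])])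
      = (fun (gs : List (List String)) (p : Int × Int) =>
        if p.2 == -1 then gs else gs ++ [pvGroup p]) from rfl]
  rw [foldl_skip (fun (gs : List (List String)) (p : Int × Int) => gs ++ [pvGroup p])
      (fun p => p.2 == -1)]
  rw [foldl_append_singleton pvGroup]
  simp

theorem cubes2rpn_eq (cubes : List (List Int)) : cubes2rpn cubes = cubes2rpn_alt cubes := by
  unfold cubes2rpn cubes2rpn_alt
  have hstep : (fun (st : List String × Int) (cube : List Int) =>
      let inner := (PySem.List.enumerate cube).foldl (fun (st2 : List String × Int) p =>
        if p.2 == -1 then st2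
        else
          let productTerm := st2.1 ++ ["V" ++ PySem.Int.toStr p.1]
          let total_vars := st2.2 + 1
          let productTerm := if p.2 == 0 then productTerm ++ ["NOT"] else productTerm
          let productTerm := if total_vars > 1 then productTerm ++ ["AND"] else productTerm
          (productTerm, total_vars)) ([], 0)
      let equation := st.1 ++ inner.1
      let total_cubes := st.2 + 1
      let equation := if total_cubes > 1 then equation ++ ["OR"] else equation
      (equation, total_cubes))
      = (fun (st : List String × Int) (cube : List Int) =>
        ((st.1 ++ cubeTerm cube) ++ (if st.2 + 1 > 1 then ["OR"] else []), st.2 + 1)) := by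
    funext st cube
    simp only [inner_eq_cubeTerm]
    split_ifs <;> simp
  rw [hstep, fold_zero cubeTerm "OR"]
  simp

-- ===== VERDICT (by name: the statement is the Claim_ definition above) =====
theorem cubes2rpn_spec : Claim_equal_cubes2rpn := by
  intro cubes _
  unfold Spec_cubes2rpn
  exact cubes2rpn_eq cubes
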